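-- pv_equiv track=rewrite | github.com/wli21/found18 | w12/w2.py | cols
-- ===== SOURCE A (Python) =====
-- def cols(src):
--   row1 = src[0].split(',')
--   ignore = [0 for _ in row1]
--
--   for index,c in enumerate(row1):
--       if '?' in c or '>' in c:
--         ignore[index] = 1
--
--   result = []
--
--   for s in src:
--     new_row = []
--     row = s.split(',')
--     for i in range(len(row1)):
--       if not ignore[i]:
--         new_row.append(row[i])
--
--     result.append(new_row)
--
--   return result
-- ===== SOURCE B (Python) =====
-- def cols(src):
--   header = src[0].split(',')
--   rows = [s.split(',') for s in src]
--   kept = [col for h, col in zip(header, zip(*rows)) if '?' not in h and '>' not in h]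
--   if not kept:
--     return [[] for _ in src]
--   return [list(r) for r in zip(*kept)]
-- ===== Notes on version B (the rewrite author's own statement) =====
-- stated objective: alternative
-- what changed: B works column-major: it transposes the comma-split rows with zip(*rows), filters whole columns by pairing them with the header via zip, and transposes the surviving columns back, instead of A's row-major loop that consults a 0/1 ignore mask per cell.
import Mathlib
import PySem

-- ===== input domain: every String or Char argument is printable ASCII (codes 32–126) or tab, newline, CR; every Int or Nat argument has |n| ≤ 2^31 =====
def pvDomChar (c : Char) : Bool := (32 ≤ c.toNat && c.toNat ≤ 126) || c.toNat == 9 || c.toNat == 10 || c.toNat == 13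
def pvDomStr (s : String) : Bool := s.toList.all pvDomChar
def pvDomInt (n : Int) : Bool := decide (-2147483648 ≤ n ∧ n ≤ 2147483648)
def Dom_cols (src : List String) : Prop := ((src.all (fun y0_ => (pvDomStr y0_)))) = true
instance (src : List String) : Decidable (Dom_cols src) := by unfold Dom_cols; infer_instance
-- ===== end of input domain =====

-- B is an alternative column-major algorithm: transpose the split rows, filter whole
-- columns against the header, transpose back — no ignore mask and no per-cell branch.

-- s.split(',') — PySem.Str.split? is exact for a nonempty separator, where it always returns some
def splitC (s : String) : List String := (PySem.Str.split? s ",").getD []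

-- src[0].split(',') — the header row, computed by both ports
def colsHeader (src : List String) : List String := splitC (PySem.List.pyGetD src 0 "")

-- ===== PORT A =====
-- the ignore array: [0 for _ in row1], then ignore[index] = 1 where '?' in c or '>' in c
def colsIgnore (row1 : List String) : List Int :=
  (PySem.List.enumerate row1 0).foldl
    (fun ig p => if PySem.Str.isIn "?" p.2 || PySem.Str.isIn ">" p.2 then ig.set p.1.toNat 1 else ig)
    (row1.map (fun _ => 0))

-- the inner loop: for i in range(len(row1)): if not ignore[i]: new_row.append(row[i])
def colsRow (ignore : List Int) (n : Nat) (row : List String) : List String :=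
  (PySem.List.pyRange 0 (n : Int) 1).foldl
    (fun nr i => if PySem.List.pyGetD ignore i 0 == 0 then nr ++ [PySem.List.pyGetD row i ""] else nr)
    []

def cols (src : List String) : List (List String) :=
  src.foldl
    (fun result s => result ++ [colsRow (colsIgnore (colsHeader src)) (colsHeader src).length (splitC s)])
    []

-- ===== PORT B =====
-- Python's zip(*ls): take heads while every list is nonempty (truncating transpose)
def zipAll : List (List String) → List (List String)
  | [] => []
  | l :: rest =>
    if (l :: rest).all (fun x => !x.isEmpty) then
      ((l :: rest).map (fun x => x.headD "")) :: zipAll (l.tail :: rest.map (·.tail))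
    else []
termination_by ls => match ls with | [] => 0 | l :: _ => l.length
decreasing_by
  cases l with
  | nil => simp_all
  | cons a t => simp

def cols_alt (src : List String) : List (List String) :=
  let header := colsHeader src
  let rows := src.map splitC
  let kept := ((header.zip (zipAll rows)).filter
      (fun p => !PySem.Str.isIn "?" p.1 && !PySem.Str.isIn ">" p.1)).map (·.2)
  if kept.isEmpty then src.map (fun _ => []) else zipAll kept

-- ===== PRECONDITION & SPEC =====
-- Pre_ excludes exactly the inputs where the Python raises: the empty list (src[0] → IndexError)
-- and inputs where some row's split is shorter than a kept header index (row[i] → IndexError).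
def Pre_cols (src : List String) : Prop :=
  src ≠ [] ∧
  ∀ s ∈ src, ∀ i ∈ List.range (splitC (src.headD "")).length,
    (!PySem.Str.isIn "?" ((splitC (src.headD "")).getD i "")
      && !PySem.Str.isIn ">" ((splitC (src.headD "")).getD i "")) = true →
    i < (splitC s).length
instance (src : List String) : Decidable (Pre_cols src) := by unfold Pre_cols; infer_instance

def pvWitness_cols : List String := ["a,b?,c", "1,2,3"]

def Spec_cols (src : List String) (out : List (List String)) : Prop := out = cols_alt src
instance (src : List String) (out : List (List String)) : Decidable (Spec_cols src out) := by unfold Spec_cols; infer_instance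

-- ===== CLAIM (what is proved, stated in full; the proofs are below) =====
def Claim_equal_cols : Prop := ∀ (src : List String), Dom_cols src → Pre_cols src → Spec_cols src (cols src)

-- ===== LEMMAS AND PROOFS =====

-- the header test, and the kept column indices as naturals
def colCond (c : String) : Bool := !PySem.Str.isIn "?" c && !PySem.Str.isIn ">" c
def keepK (hdr : List String) : List Nat :=
  (List.range hdr.length).filter (fun i => colCond (hdr.getD i ""))

-- minimum length of a nonempty family of lists (= number of columns zip(*·) produces)
def mins : List (List String) → Nat
  | [] => 0
  | l :: rest => rest.foldr (fun x m => min x.length m) l.length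

theorem foldrMin_le_base (rest : List (List String)) (b : Nat) :
    rest.foldr (fun x m => min x.length m) b ≤ b := by
  induction rest with
  | nil => simp
  | cons x xs ih => simp only [List.foldr_cons]; omega

theorem foldrMin_le_mem (rest : List (List String)) (b : Nat) (x : List String)
    (hx : x ∈ rest) : rest.foldr (fun x m => min x.length m) b ≤ x.length := by
  induction rest with
  | nil => cases hx
  | cons y ys ih =>
    simp only [List.foldr_cons]
    rcases List.mem_cons.mp hx with rfl | h
    · omega
    · have := ih h; omega

theorem lt_foldrMin (rest : List (List String)) (b i : Nat) (hb : i < b)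
    (h : ∀ x ∈ rest, i < x.length) : i < rest.foldr (fun x m => min x.length m) b := by
  induction rest with
  | nil => simpa
  | cons y ys ih =>
    simp only [List.foldr_cons]
    have h1 := h y (by simp)
    have h2 := ih (fun x hx => h x (by simp [hx]))
    omega

theorem foldrMin_const (rest : List (List String)) (c : Nat)
    (h : ∀ x ∈ rest, x.length = c) : rest.foldr (fun x m => min x.length m) c = c := by
  induction rest with
  | nil => rfl
  | cons y ys ih =>
    simp only [List.foldr_cons]
    rw [ih (fun x hx => h x (by simp [hx])), h y (by simp), min_self]

theorem mins_le (ls : List (List String)) (l : List String) (h : l ∈ ls) :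
    mins ls ≤ l.length := by
  match ls with
  | [] => cases h
  | a :: rest =>
    simp only [mins]
    rcases List.mem_cons.mp h with rfl | h
    · exact foldrMin_le_base rest l.length
    · exact foldrMin_le_mem rest a.length l h

theorem lt_mins (ls : List (List String)) (hne : ls ≠ []) (i : Nat)
    (h : ∀ l ∈ ls, i < l.length) : i < mins ls := by
  match ls with
  | [] => exact absurd rfl hne
  | a :: rest =>
    simp only [mins]
    exact lt_foldrMin rest a.length i (h a (by simp)) (fun x hx => h x (by simp [hx]))

theorem mins_const (ls : List (List String)) (hne : ls ≠ []) (c : Nat)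
    (h : ∀ l ∈ ls, l.length = c) : mins ls = c := by
  match ls with
  | [] => exact absurd rfl hne
  | a :: rest =>
    simp only [mins]
    rw [h a (by simp)]
    exact foldrMin_const rest c (fun x hx => h x (by simp [hx]))

-- tails drop the column count by one when every list is nonempty
theorem foldrMin_tail (rest : List (List String)) (b : Nat) :
    (rest.map (·.tail)).foldr (fun x m => min x.length m) (b - 1)
      = rest.foldr (fun x m => min x.length m) b - 1 := by
  induction rest with
  | nil => rfl
  | cons y ys ih =>
    simp only [List.map_cons, List.foldr_cons, ih, List.length_tail]
    omega

theorem mins_tail (l : List String) (rest : List (List String)) :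
    mins (l.tail :: rest.map (·.tail)) = mins (l :: rest) - 1 := by
  simp only [mins, List.length_tail]
  exact foldrMin_tail rest l.length

-- zipAll in closed form
theorem zipAll_eq (ls : List (List String)) :
    zipAll ls = (List.range (mins ls)).map (fun i => ls.map (fun l => l.getD i "")) := by
  suffices h : ∀ (n : Nat) (ls : List (List String)), (ls.headD []).length ≤ n →
      zipAll ls = (List.range (mins ls)).map (fun i => ls.map (fun l => l.getD i "")) from
    h (ls.headD []).length ls le_rfl
  intro n
  induction n with
  | zero =>
    intro ls hn
    match ls with
    | [] => simp [zipAll, mins]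
    | l :: rest =>
      have hl : l = [] := by
        cases l with
        | nil => rfl
        | cons a t => simp at hn
      subst hl
      rw [zipAll, if_neg (by simp)]
      have h0 : mins ([] :: rest) = 0 :=
        Nat.le_zero.mp (by simpa using mins_le ([] :: rest) [] (by simp))
      rw [h0]
      rfl
  | succ n ih =>
    intro ls hn
    match ls with
    | [] => simp [zipAll, mins]
    | l :: rest =>
      by_cases hall : ((l :: rest).all (fun x => !x.isEmpty)) = true
      · have hne' : ∀ x ∈ l :: rest, x ≠ [] := by
          intro x hx
          have := List.all_eq_true.mp hall x hx
          simpa using this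
        have h1 : 1 ≤ mins (l :: rest) := by
          refine lt_mins _ (by simp) 0 (fun x hx => ?_)
          cases x with
          | nil => exact absurd rfl (hne' _ hx)
          | cons a t => simp
        obtain ⟨m, hm⟩ : ∃ m, mins (l :: rest) = m + 1 := ⟨mins (l :: rest) - 1, by omega⟩
        have htail : mins (l.tail :: rest.map (·.tail)) = m := by rw [mins_tail, hm]; omega
        have hrec := ih (l.tail :: rest.map (·.tail)) (by simp at hn ⊢; omega)
        rw [zipAll, if_pos hall, hrec, htail, hm, List.range_succ_eq_map]
        simp only [List.map_cons, List.map_map]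
        congr 1
        · congr 1
          · cases l <;> simp
          · apply List.map_congr_left
            intro x _
            cases x <;> simp
        · apply List.map_congr_left
          intro i _
          simp only [Function.comp]
          congr 1
          · cases l <;> simp
          · apply List.map_congr_left
            intro x _
            cases x <;> simp
      · rw [zipAll, if_neg hall]
        obtain ⟨x, hx, hxe⟩ : ∃ x ∈ l :: rest, x.isEmpty = true := by
          by_contra hcon
          refine hall (List.all_eq_true.mpr (fun x hx => ?_))
          cases hxe : x.isEmpty with
          | false => simp
          | true => exact absurd ⟨x, hx, hxe⟩ hcon
        have hx0 : mins (l :: rest) = 0 := by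
          have h1 := mins_le _ x hx
          have : x = [] := by simpa using hxe
          subst this
          simpa using h1
        rw [hx0]
        rfl

-- the final ignore array is the pointwise 0/1 mask of the header
theorem ignore_eq (xs : List String) : ∀ (a : List Int),
    (PySem.List.enumerate xs (a.length : Int)).foldl
      (fun ig p => if PySem.Str.isIn "?" p.2 || PySem.Str.isIn ">" p.2 then ig.set p.1.toNat 1 else ig)
      (a ++ xs.map (fun _ => 0))
    = a ++ xs.map (fun c => if PySem.Str.isIn "?" c || PySem.Str.isIn ">" c then 1 else 0) := by
  induction xs with
  | nil => intro a; simp [PySem.List.enumerate_nil]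
  | cons x xs ih =>
    intro a
    have hset : (a ++ (0:Int) :: xs.map (fun _ => (0:Int))).set a.length 1
        = a ++ (1:Int) :: xs.map (fun _ => (0:Int)) := by
      rw [List.set_append_right _ _ (le_refl _)]
      simp
    have h1 : ((a.length : Int) + 1) = ((a.length + 1 : Nat) : Int) := by push_cast; ring
    have hih := ih (a ++ [if PySem.Str.isIn "?" x || PySem.Str.isIn ">" x then (1:Int) else 0])
    by_cases hb : (PySem.Str.isIn "?" x || PySem.Str.isIn ">" x) = true
    · rw [if_pos hb] at hih
      simp only [List.length_append, List.length_cons, List.length_nil, Nat.zero_add,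
        List.append_assoc, List.singleton_append] at hih
      simp only [List.map_cons, PySem.List.enumerate_cons, List.foldl_cons, hb, if_pos,
        Int.toNat_natCast]
      rw [hset, h1]
      simpa [hb] using hih
    · rw [if_neg hb] at hih
      simp only [List.length_append, List.length_cons, List.length_nil, Nat.zero_add,
        List.append_assoc, List.singleton_append] at hih
      simp only [List.map_cons, PySem.List.enumerate_cons, List.foldl_cons, hb, if_neg,
        Bool.not_eq_true]
      rw [h1]
      simpa [hb] using hih

-- A's inner loop in closed form over the kept indices
theorem row_eq (hdr row : List String) :
    colsRow (colsIgnore hdr) hdr.length row = (keepK hdr).map (fun i => row.getD i "") := by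
  unfold colsRow colsIgnore keepK
  have hign := ignore_eq hdr []
  simp only [List.length_nil, Nat.cast_zero, List.nil_append] at hign
  rw [hign, PySem.List.foldl_append_if, List.nil_append, PySem.List.pyRange_one]
  simp only [Int.sub_zero, Int.toNat_natCast]
  rw [List.filter_map, List.map_map]
  have hq : ∀ k ∈ List.range hdr.length,
      ((fun i => PySem.List.pyGetD (hdr.map
          (fun c => if PySem.Str.isIn "?" c || PySem.Str.isIn ">" c then (1:Int) else 0)) i 0 == 0)
        ∘ (fun k : Nat => (0:Int) + k)) k = colCond (hdr.getD k "") := by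
    intro k hk
    have hklt : k < hdr.length := List.mem_range.mp hk
    simp only [Function.comp, zero_add, PySem.List.pyGetD_natCast,
      List.getD_eq_getElem?_getD, List.getElem?_map, List.getElem?_eq_getElem hklt]
    by_cases h1 : PySem.Chars.isIn ['?'] hdr[k].toList = true <;>
      by_cases h2 : PySem.Chars.isIn ['>'] hdr[k].toList = true <;>
      simp [colCond, h1, h2]
  rw [List.filter_congr hq]
  apply List.map_congr_left
  intro k _
  simp only [Function.comp, zero_add, PySem.List.pyGetD_natCast]

-- A in closed row-major form
theorem cols_eq (src : List String) :
    cols src = src.map (fun s => (keepK (colsHeader src)).map (fun i => (splitC s).getD i "")) := by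
  unfold cols
  rw [PySem.List.foldl_append_singleton_eq_map, List.nil_append]
  exact List.map_congr_left (fun s _ => row_eq (colsHeader src) (splitC s))

-- B in the same closed form, under Pre_
theorem cols_alt_eq (src : List String) (hp : Pre_cols src) :
    cols_alt src = src.map (fun s => (keepK (colsHeader src)).map (fun i => (splitC s).getD i "")) := by
  obtain ⟨hne, hpre⟩ := hp
  have hhdr : colsHeader src = splitC (src.headD "") := by
    cases src with
    | nil => exact absurd rfl hne
    | cons a t => simp [colsHeader, PySem.List.pyGetD_zero_cons]
  have hrows_ne : src.map splitC ≠ [] := by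
    simpa using hne
  -- kept indices are below every split row's length
  have hkeep : ∀ s ∈ src, ∀ i ∈ keepK (colsHeader src), i < (splitC s).length := by
    intro s hs i hi
    obtain ⟨hir, hic⟩ := List.mem_filter.mp hi
    rw [hhdr] at hir hic
    exact hpre s hs i hir (by simpa [colCond] using hic)
  have hkm : ∀ i ∈ keepK (colsHeader src), i < mins (src.map splitC) := by
    intro i hi
    refine lt_mins _ hrows_ne i (fun l hl => ?_)
    obtain ⟨s, hs, rfl⟩ := List.mem_map.mp hl
    exact hkeep s hs i hi
  unfold cols_alt
  dsimp only
  -- the zipped header/column pairs in closed form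
  have hz : (colsHeader src).zip (zipAll (src.map splitC))
      = (List.range (min (colsHeader src).length (mins (src.map splitC)))).map
          (fun i => ((colsHeader src).getD i "", (src.map splitC).map (fun l => l.getD i ""))) := by
    rw [zipAll_eq]
    apply List.ext_getElem
    · simp
    · intro j h1 h2
      simp only [List.getElem_zip, List.getElem_map, List.getElem_range]
      simp only [List.length_zip, List.length_map, List.length_range] at h1
      rw [List.getD_eq_getElem _ _ (by omega)]
  rw [hz, List.filter_map, List.map_map]
  have hpf : ((List.range (min (colsHeader src).length (mins (src.map splitC)))).filter
        ((fun p : String × List String => !PySem.Str.isIn "?" p.1 && !PySem.Str.isIn ">" p.1)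
          ∘ (fun i => ((colsHeader src).getD i "", (src.map splitC).map (fun l => l.getD i "")))))
      = keepK (colsHeader src) := by
    unfold keepK
    obtain ⟨d, hd⟩ : ∃ d, (colsHeader src).length
        = min (colsHeader src).length (mins (src.map splitC)) + d :=
      ⟨_, (Nat.add_sub_cancel' (min_le_left _ _)).symm⟩
    conv_rhs => rw [hd, List.range_add, List.filter_append]
    have h2 : ((List.range d).map
        (fun k => min (colsHeader src).length (mins (src.map splitC)) + k)).filter
        (fun i => colCond ((colsHeader src).getD i "")) = [] := by
      rw [List.filter_eq_nil_iff]
      intro x hx hpx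
      obtain ⟨k, hk, rfl⟩ := List.mem_map.mp hx
      have hxlt : min (colsHeader src).length (mins (src.map splitC)) + k
          < (colsHeader src).length := by
        rw [hd]
        have := List.mem_range.mp hk
        omega
      have hxk : (min (colsHeader src).length (mins (src.map splitC)) + k)
          ∈ keepK (colsHeader src) :=
        List.mem_filter.mpr ⟨List.mem_range.mpr hxlt, hpx⟩
      have := hkm _ hxk
      omega
    rw [h2, List.append_nil]
    apply List.filter_congr
    intro i _
    simp [Function.comp, colCond]
  rw [hpf]
  by_cases hk : keepK (colsHeader src) = []
  · simp [hk]
  · rw [if_neg (by simp [hk])]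
    rw [show ((fun x : String × List String => x.2)
        ∘ (fun i => ((colsHeader src).getD i "", (src.map splitC).map (fun l => l.getD i ""))))
        = (fun i : Nat => (src.map splitC).map (fun l => l.getD i "")) from rfl]
    rw [zipAll_eq]
    have hmk : mins ((keepK (colsHeader src)).map
        (fun i => (src.map splitC).map (fun l => l.getD i ""))) = src.length := by
      refine mins_const _ (by simpa using hk) _ (fun l hl => ?_)
      obtain ⟨i, _, rfl⟩ := List.mem_map.mp hl
      simp
    rw [hmk]
    apply List.ext_getElem
    · simp
    · intro j h1 h2
      simp only [List.getElem_map, List.getElem_range, List.map_map]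
      apply List.map_congr_left
      intro i _
      simp only [Function.comp]
      rw [List.getD_eq_getElem _ _ (by simpa using h2), List.getElem_map]
      rfl

-- ===== VERDICT (by name: the statement is the Claim_ definition above) =====
theorem cols_spec : Claim_equal_cols := by
  intro src _ hp
  unfold Spec_cols
  rw [cols_eq, cols_alt_eq src hp]
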